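-- pv_equiv track=rewrite | github.com/sabbasi3/CodingQuestions | sparsearray.py | matchingStrings
-- ===== SOURCE A (Python) =====
-- from collections import defaultdict
--
-- def matchingStrings(strings, queries):
--     # Write your code here
--     newdict = defaultdict(int)
--     results = []
--     for s in strings:
--         newdict[s] += 1
--     for q in queries:
--         results.append(newdict[q])
--
--     return results
-- ===== SOURCE B (Python) =====
-- def matchingStrings(strings, queries):
--     # Single pass over strings: maintain the per-query answer vector directly,
--     # bumping each slot whose query equals the current string. No frequency table.
--     results = [0] * len(queries)
--     for s in strings:
--         results = [c + (q == s) for q, c in zip(queries, results)]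
--     return results
-- ===== Notes on version B (the rewrite author's own statement) =====
-- stated objective: alternative
-- what changed: B builds no frequency table and never scans strings per query: it makes one pass over strings, carrying the per-query answer vector as the loop state and incrementing every slot whose query equals the current string.
import Mathlib
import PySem

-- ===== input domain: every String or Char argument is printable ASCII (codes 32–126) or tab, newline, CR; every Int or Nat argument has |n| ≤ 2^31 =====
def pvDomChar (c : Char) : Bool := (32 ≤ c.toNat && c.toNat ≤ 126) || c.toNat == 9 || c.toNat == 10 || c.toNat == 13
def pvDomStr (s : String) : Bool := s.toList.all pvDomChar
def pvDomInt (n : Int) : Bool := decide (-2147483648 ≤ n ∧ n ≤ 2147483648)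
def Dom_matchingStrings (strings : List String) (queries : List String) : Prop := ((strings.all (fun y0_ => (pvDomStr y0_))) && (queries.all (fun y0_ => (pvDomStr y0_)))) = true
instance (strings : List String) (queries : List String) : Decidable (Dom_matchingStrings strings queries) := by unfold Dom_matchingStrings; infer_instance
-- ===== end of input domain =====

-- B replaces A's build-a-frequency-dict-then-look-up structure by one pass over strings that
-- carries the per-query answer vector as loop state (alternative decomposition, not faster).
-- ===== PORT A =====
-- Port of A: build a frequency dict over strings, then look each query up (defaultdict gives 0).
def matchingStrings (strings : List String) (queries : List String) : List Int :=
  let newdict := strings.foldl (fun d s => d.modify s 0 (· + 1)) (PySem.Dict.empty)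
  let results := queries.foldl (fun r q => r ++ [newdict.getD q 0]) []
  results

-- ===== PORT B =====
-- B: one pass over strings; the answer vector is the loop state, rebuilt per string by
-- zipping queries with the current counts ('c + (q == s)' — True counts as 1).
def matchingStrings_alt (strings : List String) (queries : List String) : List Int :=
  let init : List Int := List.replicate queries.length 0
  strings.foldl
    (fun results s => List.zipWith (fun q c => c + (if q == s then (1:Int) else 0)) queries results)
    init

-- ===== PRECONDITION & SPEC =====
def Spec_matchingStrings (strings : List String) (queries : List String) (out : List Int) : Prop := out = matchingStrings_alt strings queries
instance (strings : List String) (queries : List String) (out : List Int) : Decidable (Spec_matchingStrings strings queries out) := by unfold Spec_matchingStrings; infer_instance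

-- ===== CLAIM (what is proved, stated in full; the proofs are below) =====
def Claim_equal_matchingStrings : Prop := ∀ (strings : List String) (queries : List String), Dom_matchingStrings strings queries → Spec_matchingStrings strings queries (matchingStrings strings queries)

-- ===== LEMMAS AND PROOFS =====

-- A's append-loop over queries is a map of dictionary lookups.
theorem foldl_append_getD (newdict : PySem.Dict String Int) (queries : List String) (acc : List Int) :
    queries.foldl (fun r q => r ++ [newdict.getD q 0]) acc
      = acc ++ queries.map (fun q => newdict.getD q 0) := by
  induction queries generalizing acc with
  | nil => simp
  | cons q qs ih => simp [List.foldl, ih]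

-- A's value: per-query counts.
theorem matchingStrings_eq_map_count (strings queries : List String) :
    matchingStrings strings queries = queries.map (fun q => (strings.count q : Int)) := by
  unfold matchingStrings
  simp only []
  rw [foldl_append_getD, List.nil_append, ← PySem.Dict.counter_eq_foldl]
  simp [PySem.Dict.getD_counter]

-- zipWith against a zipWith over the same left list fuses.
theorem zipWith_zipWith_same (f g : String → Int → Int) :
    ∀ (l : List String) (l' : List Int),
      List.zipWith f l (List.zipWith g l l') = List.zipWith (fun a b => f a (g a b)) l l' := by
  intro l
  induction l with
  | nil => intro l'; simp
  | cons a as ih => intro l'; cases l' with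
    | nil => simp
    | cons b bs => simp [ih]

-- zipWith that ignores the left list returns the right list (when short enough).
theorem zipWith_snd (l : List String) (l' : List Int) (h : l'.length ≤ l.length) :
    List.zipWith (fun _ c => c) l l' = l' := by
  induction l generalizing l' with
  | nil => cases l' with
    | nil => simp
    | cons b bs => simp at h
  | cons a as ih => cases l' with
    | nil => simp
    | cons b bs =>
      simp only [List.zipWith]
      simp only [List.length_cons, Nat.add_le_add_iff_right] at h
      rw [ih bs h]

-- Loop invariant: B's fold adds the suffix counts pointwise onto the accumulator.
theorem foldl_step_eq_zipWith_count (queries : List String) :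
    ∀ (strings : List String) (acc : List Int), acc.length = queries.length →
      strings.foldl
        (fun results s => List.zipWith (fun q c => c + (if q == s then (1:Int) else 0)) queries results)
        acc
      = List.zipWith (fun q c => c + (strings.count q : Int)) queries acc := by
  intro strings
  induction strings with
  | nil =>
    intro acc h
    simp only [List.foldl, List.count_nil, Nat.cast_zero, add_zero]
    exact (zipWith_snd queries acc (le_of_eq h)).symm
  | cons s ss ih =>
    intro acc h
    simp only [List.foldl]
    rw [ih _ (by rw [List.length_zipWith, h]; omega)]
    rw [zipWith_zipWith_same]
    congr 1
    funext q c
    simp only [List.count_cons]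
    by_cases hq : q = s
    · subst hq
      simp only [beq_self_eq_true, if_true]
      push_cast; ring
    · have h1 : (q == s) = false := beq_eq_false_iff_ne.mpr hq
      have h2 : (s == q) = false := beq_eq_false_iff_ne.mpr (Ne.symm hq)
      simp only [h1, h2, Bool.false_eq_true, if_false]
      push_cast; ring

-- B's value: the same per-query counts.
theorem matchingStrings_alt_eq_map_count (strings queries : List String) :
    matchingStrings_alt strings queries = queries.map (fun q => (strings.count q : Int)) := by
  unfold matchingStrings_alt
  simp only []
  rw [foldl_step_eq_zipWith_count queries strings _ (by simp)]
  induction queries with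
  | nil => simp
  | cons q qs ih => simp [List.replicate_succ, ih]

-- ===== VERDICT (by name: the statement is the Claim_ definition above) =====
theorem matchingStrings_spec : Claim_equal_matchingStrings := by
  intro strings queries _
  unfold Spec_matchingStrings
  rw [matchingStrings_eq_map_count, matchingStrings_alt_eq_map_count]
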